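-- pv_equiv track=rewrite | github.com/TheGreatJack/GBTaxi | file_iterator.py | record_checker
-- ===== SOURCE A (Python) =====
-- def record_checker(file_data):
--     parts=[-1]
--     file_records=[]
--     for line_number in range(len(file_data)):
--         if "//\n" in file_data[line_number]:
--             parts.append(line_number)
--     for parts_id in range(1,len(parts)):
--         file_records.append(file_data[parts[parts_id-1]+1:parts[parts_id]])
--     return file_records
-- ===== SOURCE B (Python) =====
-- def record_checker(file_data):
--     records = []
--     cur = []
--     for line in file_data:
--         if "//\n" in line:
--             records.append(cur)
--             cur = []
--         else:
--             cur.append(line)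
--     return records
-- ===== Notes on version B (the rewrite author's own statement) =====
-- stated objective: simpler
-- what changed: Replaces A's two-phase scheme (collect separator indices, then build records by index slicing) with a single pass that accumulates the current record and flushes it at each separator, dropping the trailing buffer.
import Mathlib
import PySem

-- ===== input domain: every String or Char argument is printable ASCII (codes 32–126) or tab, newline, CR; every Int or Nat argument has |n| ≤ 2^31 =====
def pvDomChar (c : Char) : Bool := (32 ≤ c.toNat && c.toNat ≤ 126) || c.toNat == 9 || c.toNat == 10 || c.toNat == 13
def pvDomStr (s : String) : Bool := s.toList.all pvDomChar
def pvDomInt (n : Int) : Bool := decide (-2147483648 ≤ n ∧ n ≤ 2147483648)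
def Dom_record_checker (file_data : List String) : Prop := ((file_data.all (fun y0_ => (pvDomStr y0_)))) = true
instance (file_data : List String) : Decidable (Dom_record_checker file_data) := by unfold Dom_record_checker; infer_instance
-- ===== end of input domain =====

-- B replaces A's two-phase index/slice scheme with a single accumulating pass (objective: simpler).

-- ===== PORT A =====
def record_checker (file_data : List String) : List (List String) :=
  let parts : List Int := (PySem.List.pyRange 0 (file_data.length : Int) 1).foldl
    (fun parts line_number =>
      if PySem.Str.isIn "//\n" (PySem.List.pyGetD file_data line_number "") then parts ++ [line_number]
      else parts)
    [-1]
  let file_records : List (List String) := (PySem.List.pyRange 1 (parts.length : Int) 1).foldl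
    (fun file_records parts_id =>
      file_records ++ [PySem.List.slice file_data
        (some (PySem.List.pyGetD parts (parts_id - 1) 0 + 1))
        (some (PySem.List.pyGetD parts parts_id 0))])
    []
  file_records

-- ===== PORT B =====
def record_checker_alt (file_data : List String) : List (List String) :=
  (file_data.foldl
    (fun (st : List (List String) × List String) line =>
      if PySem.Str.isIn "//\n" line then (st.1 ++ [st.2], []) else (st.1, st.2 ++ [line]))
    ([], [])).1

-- ===== PRECONDITION & SPEC =====
def Spec_record_checker (file_data : List String) (out : List (List String)) : Prop := out = record_checker_alt file_data
instance (file_data : List String) (out : List (List String)) : Decidable (Spec_record_checker file_data out) := by unfold Spec_record_checker; infer_instance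

-- ===== CLAIM (what is proved, stated in full; the proofs are below) =====
def Claim_equal_record_checker : Prop := ∀ (file_data : List String), Dom_record_checker file_data → Spec_record_checker file_data (record_checker file_data)

-- ===== LEMMAS AND PROOFS =====

-- records as structural recursion: flush at separators, drop the trailing buffer
def pvGRec : List String → List (List String)
  | [] => []
  | x :: xs =>
    if PySem.Str.isIn "//\n" x then [] :: pvGRec xs
    else match pvGRec xs with
      | [] => []
      | r :: rs => (x :: r) :: rs

-- indices of the separator lines, counter k
def pvSepIdx : List String → Nat → List Nat
  | [], _ => []
  | x :: xs, k => if PySem.Str.isIn "//\n" x then k :: pvSepIdx xs (k+1) else pvSepIdx xs (k+1)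

lemma pvSepIdx_cons_pos (x : String) (xs : List String) (k : Nat)
    (h : PySem.Str.isIn "//\n" x = true) :
    pvSepIdx (x :: xs) k = k :: pvSepIdx xs (k+1) := by
  simp at h; simp [pvSepIdx, h]

lemma pvSepIdx_cons_neg (x : String) (xs : List String) (k : Nat)
    (h : ¬ PySem.Str.isIn "//\n" x = true) :
    pvSepIdx (x :: xs) k = pvSepIdx xs (k+1) := by
  simp at h; simp [pvSepIdx, h]

lemma pvGRec_cons_pos (x : String) (xs : List String)
    (h : PySem.Str.isIn "//\n" x = true) :
    pvGRec (x :: xs) = [] :: pvGRec xs := by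
  simp at h; simp [pvGRec, h]

lemma pvGRec_cons_neg (x : String) (xs : List String)
    (h : ¬ PySem.Str.isIn "//\n" x = true) :
    pvGRec (x :: xs) = match pvGRec xs with | [] => [] | r :: rs => (x :: r) :: rs := by
  simp at h; simp [pvGRec, h]

lemma pv_sepIdx_le (t : List String) (k q : Nat) (hq : q ∈ pvSepIdx t k) : k ≤ q := by
  induction t generalizing k with
  | nil => simp [pvSepIdx] at hq
  | cons x xs ih =>
    by_cases hx : PySem.Str.isIn "//\n" x = true
    · rw [pvSepIdx_cons_pos x xs k hx] at hq
      rcases List.mem_cons.mp hq with h | h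
      · omega
      · have := ih (k+1) h; omega
    · rw [pvSepIdx_cons_neg x xs k hx] at hq
      have := ih (k+1) hq; omega

lemma pv_filter_sepIdx (xs : List String) (a : Nat) (h : a ≤ xs.length) :
    (PySem.List.pyRange (a : Int) (xs.length : Int) 1).filter
      (fun i => PySem.Str.isIn "//\n" (PySem.List.pyGetD xs i ""))
    = (pvSepIdx (xs.drop a) a).map (fun (q : Nat) => (q : Int)) := by
  obtain ⟨n, hn⟩ : ∃ n, xs.length - a = n := ⟨_, rfl⟩
  induction n generalizing a with
  | zero =>
    have ha : a = xs.length := by omega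
    rw [PySem.List.pyRange_one_eq_nil (by exact_mod_cast Nat.le_of_eq ha.symm)]
    simp [ha, pvSepIdx]
  | succ n ih =>
    have hlt : a < xs.length := by omega
    rw [PySem.List.pyRange_one_cons (by exact_mod_cast hlt)]
    rw [List.filter_cons]
    have hget : PySem.List.pyGetD xs (a : Int) "" = xs[a] := by
      simp [PySem.List.pyGetD_natCast, hlt]
    have hdrop : xs.drop a = xs[a] :: xs.drop (a + 1) := List.drop_eq_getElem_cons hlt
    have hcast : ((a : Int) + 1) = ((a + 1 : Nat) : Int) := by push_cast; ring
    rw [hget, hdrop, hcast, ih (a + 1) (by omega) (by omega)]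
    by_cases hs : PySem.Str.isIn "//\n" xs[a] = true
    · rw [if_pos hs, pvSepIdx_cons_pos _ _ _ hs, List.map_cons]
    · rw [if_neg hs, pvSepIdx_cons_neg _ _ _ hs]

lemma pv_zip_gRec (xs : List String) (a : Nat) (h : a ≤ xs.length) :
    List.zipWith (fun p q => PySem.List.slice xs (some (p + 1)) (some q))
      (((a : Int) - 1) :: (pvSepIdx (xs.drop a) a).map (fun (q : Nat) => (q : Int)))
      ((pvSepIdx (xs.drop a) a).map (fun (q : Nat) => (q : Int)))
    = pvGRec (xs.drop a) := by
  obtain ⟨n, hn⟩ : ∃ n, xs.length - a = n := ⟨_, rfl⟩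
  induction n generalizing a with
  | zero =>
    have ha : a = xs.length := by omega
    simp [ha, pvSepIdx, List.drop_length, pvGRec]
  | succ n ih =>
    have hlt : a < xs.length := by omega
    have hdrop : xs.drop a = xs[a] :: xs.drop (a + 1) := List.drop_eq_getElem_cons hlt
    have ihr := ih (a + 1) (by omega) (by omega)
    have h3 : ((a + 1 : Nat) : Int) - 1 = (a : Int) := by push_cast; ring
    rw [h3] at ihr
    rw [hdrop]
    by_cases hs : PySem.Str.isIn "//\n" xs[a] = true
    · rw [pvSepIdx_cons_pos _ _ _ hs, pvGRec_cons_pos _ _ hs, List.map_cons,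
        List.zipWith_cons_cons]
      have h1 : (a : Int) - 1 + 1 = ((a : Nat) : Int) := by ring
      have h2 : PySem.List.slice xs (some ((a : Nat) : Int)) (some ((a : Nat) : Int)) = [] := by
        rw [PySem.List.slice_natCast]; simp
      rw [h1, h2, ihr]
    · rw [pvSepIdx_cons_neg _ _ _ hs, pvGRec_cons_neg _ _ hs]
      cases hS : pvSepIdx (xs.drop (a + 1)) (a + 1) with
      | nil =>
        rw [hS] at ihr
        simp only [List.map_nil, List.zipWith_nil_right] at ihr ⊢
        rw [← ihr]
      | cons q S' =>
        rw [hS] at ihr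
        simp only [List.map_cons, List.zipWith_cons_cons] at ihr ⊢
        have haq : a + 1 ≤ q := pv_sepIdx_le _ _ _ (by rw [hS]; exact List.mem_cons_self ..)
        have hcons : PySem.List.slice xs (some ((a : Int) - 1 + 1)) (some ((q : Nat) : Int))
            = xs[a] :: PySem.List.slice xs (some ((a : Int) + 1)) (some ((q : Nat) : Int)) := by
          have h1 : (a : Int) - 1 + 1 = ((a : Nat) : Int) := by ring
          have h2 : (a : Int) + 1 = ((a + 1 : Nat) : Int) := by push_cast; ring
          rw [h1, h2, PySem.List.slice_natCast, PySem.List.slice_natCast, hdrop]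
          have hq1 : q - a = (q - (a + 1)) + 1 := by omega
          rw [hq1, List.take_succ_cons]
        rw [hcons, ← ihr]

lemma pv_map_zip (L : List Int) (g : Int → Int → List String) :
    (PySem.List.pyRange 1 (L.length : Int) 1).map
      (fun j => g (PySem.List.pyGetD L (j - 1) 0) (PySem.List.pyGetD L j 0))
    = List.zipWith g L L.tail := by
  apply List.ext_getElem
  · simp [PySem.List.length_pyRange_one, List.length_tail]
  · intro k h1 h2
    have hk : k + 1 < L.length := by
      have h1' := h1
      simp only [List.length_map, PySem.List.length_pyRange_one] at h1'
      omega
    rw [List.getElem_map, PySem.List.getElem_pyRange_one]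
    have e1 : (1 : Int) + (k : Int) - 1 = ((k : Nat) : Int) := by ring
    have e2 : (1 : Int) + (k : Int) = ((k + 1 : Nat) : Int) := by push_cast; ring
    rw [e1, e2]
    rw [PySem.List.pyGetD_natCast, PySem.List.pyGetD_natCast]
    rw [List.getD_eq_getElem L 0 (by omega), List.getD_eq_getElem L 0 (by omega)]
    rw [List.getElem_zipWith]
    congr 1
    rw [List.getElem_tail]

lemma pv_foldB (xs : List String) (res : List (List String)) (cur : List String) :
    (xs.foldl
      (fun (st : List (List String) × List String) line =>
        if PySem.Str.isIn "//\n" line then (st.1 ++ [st.2], []) else (st.1, st.2 ++ [line]))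
      (res, cur)).1
    = res ++ (match pvGRec xs with | [] => [] | r :: rs => (cur ++ r) :: rs) := by
  induction xs generalizing res cur with
  | nil => simp [pvGRec]
  | cons x xs ih =>
    simp only [List.foldl_cons]
    by_cases hx : PySem.Str.isIn "//\n" x = true
    · simp only [hx, if_true, ih, pvGRec_cons_pos _ _ hx]
      cases pvGRec xs <;> simp
    · simp only [hx, ih, pvGRec_cons_neg _ _ hx]
      cases pvGRec xs <;> simp

-- ===== VERDICT (by name: the statement is the Claim_ definition above) =====
theorem record_checker_spec : Claim_equal_record_checker := by
  intro file_data _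
  unfold Spec_record_checker
  simp only [record_checker, record_checker_alt]
  rw [PySem.List.foldl_append_if_eq_filter]
  have hfil := pv_filter_sepIdx file_data 0 (Nat.zero_le _)
  simp only [Int.natCast_zero, List.drop_zero] at hfil
  rw [hfil]
  rw [PySem.List.foldl_append_singleton_eq_map, List.nil_append]
  rw [List.singleton_append,
    pv_map_zip ((-1) :: (pvSepIdx file_data 0).map (fun (q : Nat) => (q : Int)))
      (fun p q => PySem.List.slice file_data (some (p + 1)) (some q))]
  have hzip := pv_zip_gRec file_data 0 (Nat.zero_le _)
  simp only [Int.natCast_zero, List.drop_zero, zero_sub] at hzip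
  rw [List.tail_cons, hzip]
  rw [pv_foldB]
  cases pvGRec file_data <;> simp
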